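-- pv_equiv track=rewrite | github.com/google/or-tools | examples/contrib/nonogram_default_search.py | make_transition_tuples
-- ===== SOURCE A (Python) =====
-- def make_transition_tuples(pattern):
--   p_len = len(pattern)
--   num_states = p_len + sum(pattern)
--
--   tuples = []
--
--   # this is for handling 0-clues. It generates
--   # just the minimal state
--   if num_states == 0:
--     tuples.append((1, 0, 1))
--     return (tuples, 1)
--
--   # convert pattern to a 0/1 pattern for easy handling of
--   # the states
--   tmp = [0]
--   c = 0
--   for pattern_index in range(p_len):
--     tmp.extend([1] * pattern[pattern_index])
--     tmp.append(0)
--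
--   for i in range(num_states):
--     state = i + 1
--     if tmp[i] == 0:
--       tuples.append((state, 0, state))
--       tuples.append((state, 1, state + 1))
--     else:
--       if i < num_states - 1:
--         if tmp[i + 1] == 1:
--           tuples.append((state, 1, state + 1))
--         else:
--           tuples.append((state, 0, state + 1))
--   tuples.append((num_states, 0, num_states))
--   return (tuples, num_states)
-- ===== SOURCE B (Python) =====
-- def make_transition_tuples(pattern):
--     num_states = len(pattern) + sum(pattern)
--     if num_states == 0:
--         return ([(1, 0, 1)], 1)
--     tuples = []
--     s = 1
--     # leading gap state
--     if s <= num_states: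
--         tuples.append((s, 0, s))
--         tuples.append((s, 1, s + 1))
--     s += 1
--     for b in pattern:
--         n = b if b > 0 else 0
--         # block states of this clue
--         for k in range(n):
--             if s < num_states:
--                 tuples.append((s, 1 if k < n - 1 else 0, s + 1))
--             s += 1
--         # trailing gap state
--         if s <= num_states:
--             tuples.append((s, 0, s))
--             tuples.append((s, 1, s + 1))
--         s += 1
--     tuples.append((num_states, 0, num_states))
--     return (tuples, num_states)
-- ===== Notes on version B (the rewrite author's own statement) =====
-- stated objective: simpler
-- what changed: B drops A's intermediate flattened 0/1 scratch array and its index scan, emitting the transition tuples in one direct pass over the clue list with a running state counter.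
import Mathlib
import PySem

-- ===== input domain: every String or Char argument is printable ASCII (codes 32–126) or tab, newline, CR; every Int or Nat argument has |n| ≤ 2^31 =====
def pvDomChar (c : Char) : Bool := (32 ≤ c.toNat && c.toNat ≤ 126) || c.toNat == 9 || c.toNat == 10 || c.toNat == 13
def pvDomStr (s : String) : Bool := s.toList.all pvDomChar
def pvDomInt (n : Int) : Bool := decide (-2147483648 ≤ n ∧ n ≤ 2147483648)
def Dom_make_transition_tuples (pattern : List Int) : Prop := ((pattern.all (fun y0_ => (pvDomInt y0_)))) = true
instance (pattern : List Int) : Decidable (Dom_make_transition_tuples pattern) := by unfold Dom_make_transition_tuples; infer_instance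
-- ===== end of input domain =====

-- B replaces A's flattened 0/1 scratch array and index scan by one direct pass over the clues
-- with a running state counter (objective: simpler, no intermediate array; same output).

-- ===== PORT A =====
-- loop body of "for i in range(num_states): ..." (tmp[i] is always in range when A runs; .getD 0 is never taken)
def aBody (tmp : List Int) (ns : Int) (acc : List (Int × Int × Int)) (i : Int) : List (Int × Int × Int) :=
  let state := i + 1
  if (PySem.List.pyGet? tmp i).getD 0 = 0 then
    acc ++ [(state, 0, state), (state, 1, state + 1)]
  else if i < ns - 1 then
    if (PySem.List.pyGet? tmp (i + 1)).getD 0 = 1 then acc ++ [(state, 1, state + 1)]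
    else acc ++ [(state, 0, state + 1)]
  else acc

def make_transition_tuples (pattern : List Int) : (List (Int × Int × Int)) × Int :=
  let p_len : Int := pattern.length
  let num_states : Int := p_len + pattern.sum
  if num_states = 0 then ([(1, 0, 1)], 1)
  else
    -- tmp = [0]; for each clue: tmp.extend([1]*c); tmp.append(0)   ([1]*c is empty for c ≤ 0)
    let tmp : List Int := pattern.foldl (fun t c => t ++ (List.replicate c.toNat 1 ++ [0])) [0]
    let tuples := (PySem.List.pyRange 0 num_states 1).foldl (aBody tmp num_states) []
    (tuples ++ [(num_states, 0, num_states)], num_states)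

-- ===== PORT B =====
-- "for k in range(n)" of Source B, argument = number of block states still to process (m = n - k; k < n-1 ⇔ 0 < m-1+... here 0 < m)
def bBlock (stop s : Int) : Nat → List (Int × Int × Int)
  | 0 => []
  | m + 1 =>
    (if s < stop then [(s, if 0 < m then (1 : Int) else 0, s + 1)] else []) ++ bBlock stop (s + 1) m

-- "for b in pattern" of Source B; n = b if b > 0 else 0 is b.toNat
def bMain (stop : Int) : List Int → Int → List (Int × Int × Int)
  | [], _ => []
  | b :: rest, s =>
    let n := b.toNat
    bBlock stop s n ++
      (if s + (n : Int) ≤ stop then [(s + (n : Int), 0, s + n), (s + n, 1, s + n + 1)] else []) ++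
      bMain stop rest (s + n + 1)

def make_transition_tuples_alt (pattern : List Int) : (List (Int × Int × Int)) × Int :=
  let num_states : Int := pattern.length + pattern.sum
  if num_states = 0 then ([(1, 0, 1)], 1)
  else
    let init := if (1 : Int) ≤ num_states then [((1 : Int), (0 : Int), (1 : Int)), (1, 1, 2)] else []
    (init ++ bMain num_states pattern 2 ++ [(num_states, 0, num_states)], num_states)

-- ===== PRECONDITION & SPEC =====
def Spec_make_transition_tuples (pattern : List Int) (out : (List (Int × Int × Int)) × Int) : Prop := out = make_transition_tuples_alt pattern
instance (pattern : List Int) (out : (List (Int × Int × Int)) × Int) : Decidable (Spec_make_transition_tuples pattern out) := by unfold Spec_make_transition_tuples; infer_instance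

-- ===== CLAIM (what is proved, stated in full; the proofs are below) =====
def Claim_equal_make_transition_tuples : Prop := ∀ (pattern : List Int), Dom_make_transition_tuples pattern → Spec_make_transition_tuples pattern (make_transition_tuples pattern)

-- ===== LEMMAS AND PROOFS =====

-- common characterisation: emit the tuples for the positions of the 0/1 list, states s, s+1, …, capped at stop
def scan (stop : Int) : List Int → Int → List (Int × Int × Int)
  | [], _ => []
  | t :: rest, s =>
    if stop < s then []
    else if t = 0 then (s, 0, s) :: (s, 1, s + 1) :: scan stop rest (s + 1)
    else if s < stop then (s, if rest.head?.getD 0 = 1 then (1 : Int) else 0, s + 1) :: scan stop rest (s + 1)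
    else scan stop rest (s + 1)

def segs (l : List Int) : List Int := l.flatMap (fun b => List.replicate b.toNat 1 ++ [0])

theorem scan_nil (stop : Int) (l : List Int) (s : Int) (h : stop < s) : scan stop l s = [] := by
  induction l generalizing s with
  | nil => simp [scan]
  | cons t rest ih => simp [scan, h]

theorem bBlock_nil (stop s : Int) (m : Nat) (h : stop < s) : bBlock stop s m = [] := by
  induction m generalizing s with
  | zero => simp [bBlock]
  | succ m ih => simp [bBlock, ih (s + 1) (by omega)]; omega

theorem bMain_nil (stop : Int) (l : List Int) (s : Int) (h : stop < s) : bMain stop l s = [] := by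
  induction l generalizing s with
  | nil => simp [bMain]
  | cons b rest ih =>
    have h1 : ¬ (s + (b.toNat : Int) ≤ stop) := by omega
    simp only [bMain, bBlock_nil stop s _ h, h1, if_false, List.nil_append]
    exact ih _ (by omega)

theorem scan_seg (stop : Int) (n : Nat) (rest : List Int) (s : Int) :
    scan stop (List.replicate n 1 ++ 0 :: rest) s
      = bBlock stop s n ++
        (if s + (n : Int) ≤ stop then [(s + (n : Int), 0, s + n), (s + n, 1, s + n + 1)] else []) ++
        scan stop rest (s + (n : Int) + 1) := by
  induction n generalizing s with
  | zero =>
    push_cast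
    by_cases hs : stop < s
    · simp [scan, bBlock, hs, scan_nil stop rest (s + 1) (by omega),
        show ¬ s ≤ stop from by omega]
    · simp [scan, bBlock, hs, show s ≤ stop from by omega]
  | succ n ih =>
    have hhead : ((List.replicate n (1:Int) ++ 0 :: rest).head?.getD 0 = 1) = (0 < n) := by
      cases n <;> simp [List.replicate_succ]
    push_cast
    by_cases hs : stop < s
    · simp [List.replicate_succ, scan, bBlock, hs, show ¬ s < stop from by omega,
        bBlock_nil stop (s + 1) n (by omega),
        show ¬ s + ((n:Int) + 1) ≤ stop from by omega,
        scan_nil stop rest (s + ((n:Int) + 1) + 1) (by omega)]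
    · by_cases h2 : s < stop
      · simp only [List.replicate_succ, List.cons_append, scan, if_neg hs,
          if_neg (by norm_num : ¬ (1:Int) = 0), if_pos h2, hhead]
        rw [ih (s + 1)]
        simp only [bBlock, if_pos h2, List.cons_append, List.nil_append, List.append_assoc]
        ring_nf
      · simp only [List.replicate_succ, List.cons_append, scan, if_neg hs,
          if_neg (by norm_num : ¬ (1:Int) = 0), if_neg h2]
        rw [ih (s + 1)]
        simp [bBlock, h2, bBlock_nil stop (s + 1) n (by omega),
          show ¬ s + 1 + (n:Int) ≤ stop from by omega,
          show ¬ s + ((n:Int) + 1) ≤ stop from by omega,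
          scan_nil stop rest (s + 1 + (n:Int) + 1) (by omega),
          scan_nil stop rest (s + ((n:Int) + 1) + 1) (by omega)]

theorem scan_segs (stop : Int) (l : List Int) (s : Int) : scan stop (segs l) s = bMain stop l s := by
  induction l generalizing s with
  | nil => simp [segs, scan, bMain]
  | cons b rest ih =>
    have hseg : segs (b :: rest) = List.replicate b.toNat 1 ++ 0 :: segs rest := by
      simp [segs, List.flatMap_cons]
    rw [hseg, scan_seg, ih]
    simp [bMain]

theorem tmp_eq (pattern : List Int) :
    pattern.foldl (fun t c => t ++ (List.replicate c.toNat 1 ++ [0])) [0] = 0 :: segs pattern := by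
  rw [PySem.List.foldl_append_eq_flatMap]
  rfl

theorem sum_le_toNat_sum (l : List Int) : l.sum ≤ ((l.map Int.toNat).sum : Int) := by
  induction l with
  | nil => simp
  | cons b rest ih =>
    simp only [List.sum_cons, List.map_cons]
    have hb := Int.self_le_toNat b
    push_cast
    push_cast at ih
    omega

theorem segs_length (l : List Int) : (segs l).length = (l.map Int.toNat).sum + l.length := by
  induction l with
  | nil => simp [segs]
  | cons b rest ih =>
    simp only [segs, List.flatMap_cons, List.length_append, List.length_replicate,
      List.length_cons, List.length_nil, List.map_cons, List.sum_cons] at ih ⊢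
    omega

theorem foldl_aBody (tmp : List Int) (ns : Int) (hns : ns ≤ (tmp.length : Int)) :
    ∀ (d k : Nat) (acc : List (Int × Int × Int)), (ns - (k : Int)).toNat = d →
      (PySem.List.pyRange (k : Int) ns 1).foldl (aBody tmp ns) acc
        = acc ++ scan ns (tmp.drop k) ((k : Int) + 1) := by
  intro d
  induction d with
  | zero =>
    intro k acc hd
    have h1 : ns ≤ (k : Int) := by omega
    rw [PySem.List.pyRange_one_eq_nil h1, List.foldl_nil,
      scan_nil ns (tmp.drop k) ((k : Int) + 1) (by omega)]
    simp
  | succ d ih =>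
    intro k acc hd
    have hk : (k : Int) < ns := by omega
    have hklen : k < tmp.length := by omega
    rw [PySem.List.pyRange_one_cons hk, List.foldl_cons]
    have hcast : (k : Int) + 1 = ((k + 1 : Nat) : Int) := by push_cast; ring
    have hget : (PySem.List.pyGet? tmp (k : Int)).getD 0 = tmp[k] := by
      simp [PySem.List.pyGet?_natCast, List.getElem?_eq_getElem hklen]
    have hdrop : tmp.drop k = tmp[k] :: tmp.drop (k + 1) := List.drop_eq_getElem_cons hklen
    have hrec := fun acc' => ih (k + 1) acc' (by push_cast; omega)
    by_cases t0 : tmp[k] = 0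
    · rw [show aBody tmp ns acc (k : Int) = acc ++ [((k:Int)+1, 0, (k:Int)+1), ((k:Int)+1, 1, (k:Int)+1+1)] from by
        simp [aBody, List.getElem?_eq_getElem hklen, t0]]
      rw [hdrop]
      simp only [scan, if_neg (by omega : ¬ ns < (k : Int) + 1), t0]
      rw [hcast, hrec]
      simp [List.append_assoc]
    · by_cases hlt : (k : Int) < ns - 1
      · have hk1len : k + 1 < tmp.length := by omega
        have hhead : (tmp.drop (k + 1)).head?.getD 0 = tmp[k + 1] := by
          simp [List.head?_drop, List.getElem?_eq_getElem hk1len]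
        have hget1 : (PySem.List.pyGet? tmp ((k : Int) + 1)).getD 0 = tmp[k + 1] := by
          rw [hcast]
          simp only [PySem.List.pyGet?_natCast, List.getElem?_eq_getElem hk1len, Option.getD_some]
        rw [show aBody tmp ns acc (k : Int)
            = acc ++ [((k:Int)+1, if tmp[k+1] = 1 then (1:Int) else 0, (k:Int)+1+1)] from by
          simp only [aBody]
          rw [hget, hget1]
          by_cases h1 : tmp[k+1] = 1 <;> simp [t0, hlt, h1]]
        rw [hdrop]
        simp only [scan, if_neg (by omega : ¬ ns < (k : Int) + 1), if_neg t0,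
          if_pos (by omega : (k : Int) + 1 < ns), hhead]
        rw [hcast, hrec]
        simp [List.append_assoc]
      · rw [show aBody tmp ns acc (k : Int) = acc from by
          simp [aBody, List.getElem?_eq_getElem hklen, t0, hlt]]
        rw [hdrop]
        simp only [scan, if_neg (by omega : ¬ ns < (k : Int) + 1), if_neg t0,
          if_neg (by omega : ¬ (k : Int) + 1 < ns)]
        rw [hcast, hrec]

theorem make_transition_tuples_eq (pattern : List Int) :
    make_transition_tuples pattern = make_transition_tuples_alt pattern := by
  simp only [make_transition_tuples, make_transition_tuples_alt]
  set ns : Int := (pattern.length : Int) + pattern.sum with hns_def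
  by_cases h0 : ns = 0
  · simp [h0]
  · simp only [h0, if_false]
    have htmp : pattern.foldl (fun t c => t ++ (List.replicate c.toNat 1 ++ [0])) [0]
        = 0 :: segs pattern := tmp_eq pattern
    rw [htmp]
    have hlen : ns ≤ ((0 :: segs pattern).length : Int) := by
      have h1 := sum_le_toNat_sum pattern
      have h2 : ((segs pattern).length : Int)
          = ((pattern.map Int.toNat).sum : Int) + (pattern.length : Int) := by
        exact_mod_cast segs_length pattern
      simp only [List.length_cons]
      push_cast
      push_cast at h1 h2
      omega
    have hfold := foldl_aBody (0 :: segs pattern) ns hlen (ns - ((0 : Nat) : Int)).toNat 0 [] rfl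
    simp only [Nat.cast_zero, List.drop_zero, List.nil_append, zero_add] at hfold
    rw [hfold]
    by_cases h1 : ns < 1
    · have hb : bMain ns pattern 2 = [] := bMain_nil ns pattern 2 (by omega)
      simp [scan, h1, hb, show ¬ (1 : Int) ≤ ns from by omega]
    · have h2 : (1 : Int) ≤ ns := by omega
      simp only [scan, if_neg (by omega : ¬ ns < 1), if_pos h2]
      norm_num [show (1 : Int) + 1 = 2 from by norm_num, scan_segs ns pattern 2]

-- ===== VERDICT (by name: the statement is the Claim_ definition above) =====
theorem make_transition_tuples_spec : Claim_equal_make_transition_tuples := by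
  intro pattern _
  unfold Spec_make_transition_tuples
  exact make_transition_tuples_eq pattern
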